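-- pv_equiv track=rewrite | github.com/Alexander-Wilms/advent_of_code_2022 | day_6/tuning_trouble.py | get_first_idx_after_n_distinct_chars
-- ===== SOURCE A (Python) =====
-- def get_first_idx_after_n_distinct_chars(buffer: str, n: int) -> int:
--     idx = 1
--     for _ in buffer:
--         if idx >= n:
--             potential_marker = buffer[idx-n:idx]
--             unique_chars = set(potential_marker)
--             if len(potential_marker) == len(unique_chars):
--                 return idx
--         idx += 1
-- ===== SOURCE B (Python) =====
-- def get_first_idx_after_n_distinct_chars(buffer: str, n: int) -> int:
--     # Sliding window: `window` is always the longest duplicate-free suffix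
--     # of the characters consumed so far; return as soon as it reaches n.
--     window = []
--     idx = 0
--     for c in buffer:
--         if c in window:
--             while window.pop(0) != c:
--                 pass
--         window.append(c)
--         idx += 1
--         if len(window) >= n:
--             return idx
-- ===== Notes on version B (the rewrite author's own statement) =====
-- stated objective: faster
-- what changed: Replaced the per-index slice-and-build-a-set check (O(n) work at every position) by a single sliding window that maintains the longest duplicate-free suffix of the scanned prefix, shrinking it from the left only when the incoming character repeats.
import Mathlib
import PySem

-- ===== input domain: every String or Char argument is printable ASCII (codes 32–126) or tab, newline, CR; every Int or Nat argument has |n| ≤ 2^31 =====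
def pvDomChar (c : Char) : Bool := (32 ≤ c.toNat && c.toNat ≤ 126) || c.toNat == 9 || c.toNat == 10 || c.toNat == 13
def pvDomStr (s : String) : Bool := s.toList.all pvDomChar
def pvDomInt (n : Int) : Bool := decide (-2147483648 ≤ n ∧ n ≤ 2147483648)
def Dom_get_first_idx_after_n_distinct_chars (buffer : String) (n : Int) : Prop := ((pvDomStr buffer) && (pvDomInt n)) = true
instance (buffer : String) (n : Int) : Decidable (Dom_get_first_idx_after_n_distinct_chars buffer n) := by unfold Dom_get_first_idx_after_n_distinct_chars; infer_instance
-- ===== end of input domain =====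

-- B replaces A's per-index slice + set construction by a sliding window holding the
-- longest duplicate-free suffix of the scanned prefix (objective: faster).

-- ===== PORT A =====
-- A's loop: idx starts at 1, one iteration per character of the buffer; when
-- idx >= n it slices buffer[idx-n:idx], builds a set and compares lengths.
def pvAGo (chars : List Char) (fuel : List Char) (idx n : Int) : Option Int :=
  match fuel with
  | [] => none
  | _ :: rest =>
    if idx ≥ n then
      let potential_marker := PySem.List.slice chars (some (idx - n)) (some idx)
      let unique_chars : PySem.Set Char := PySem.Set.ofList potential_marker
      if (potential_marker.length : Int) = PySem.Set.len unique_chars then some idx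
      else pvAGo chars rest (idx + 1) n
    else pvAGo chars rest (idx + 1) n

def get_first_idx_after_n_distinct_chars (buffer : String) (n : Int) : Option Int :=
  pvAGo buffer.toList buffer.toList 1 n

-- ===== PORT B =====
-- `while window.pop(0) != c: pass` — pops from the front until (and including) c.
def pvDropThrough (c : Char) : List Char → List Char
  | [] => []
  | x :: xs => if x = c then xs else pvDropThrough c xs

def pvBGo (fuel : List Char) (window : List Char) (idx n : Int) : Option Int :=
  match fuel with
  | [] => none
  | c :: rest =>
    let window := if window.contains c then pvDropThrough c window else window
    let window := window ++ [c]
    let idx := idx + 1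
    if (window.length : Int) ≥ n then some idx else pvBGo rest window idx n

def get_first_idx_after_n_distinct_chars_alt (buffer : String) (n : Int) : Option Int :=
  pvBGo buffer.toList [] 0 n

-- ===== PRECONDITION & SPEC =====
def Spec_get_first_idx_after_n_distinct_chars (buffer : String) (n : Int) (out : Option Int) : Prop := out = get_first_idx_after_n_distinct_chars_alt buffer n
instance (buffer : String) (n : Int) (out : Option Int) : Decidable (Spec_get_first_idx_after_n_distinct_chars buffer n out) := by unfold Spec_get_first_idx_after_n_distinct_chars; infer_instance

-- ===== CLAIM (what is proved, stated in full; the proofs are below) =====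
def Claim_equal_get_first_idx_after_n_distinct_chars : Prop := ∀ (buffer : String) (n : Int), Dom_get_first_idx_after_n_distinct_chars buffer n → Spec_get_first_idx_after_n_distinct_chars buffer n (get_first_idx_after_n_distinct_chars buffer n)

-- ===== LEMMAS AND PROOFS =====

-- Invariant: w is a longest duplicate-free suffix of the scanned prefix p.
def pvLds (p w : List Char) : Prop :=
  w <:+ p ∧ w.Nodup ∧ ∀ s : List Char, s <:+ p → s.Nodup → s.length ≤ w.length

theorem pvSuffix_concat_case {s p : List Char} {c : Char} (h : s <:+ p ++ [c]) :
    s = [] ∨ ∃ s', s = s' ++ [c] ∧ s' <:+ p := by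
  rcases List.eq_nil_or_concat s with rfl | ⟨s', c', rfl⟩
  · exact Or.inl rfl
  · right
    rcases h with ⟨t, ht⟩
    rw [List.concat_eq_append, ← List.append_assoc] at ht
    have h4 := List.append_inj' ht rfl
    have hc : c' = c := by simpa using h4.2
    subst hc
    exact ⟨s', by simp, t, h4.1⟩

theorem pvSuffix_of_suffix_le {s₁ s₂ l : List Char} (h1 : s₁ <:+ l) (h2 : s₂ <:+ l)
    (hle : s₁.length ≤ s₂.length) : s₁ <:+ s₂ := by
  rw [← List.reverse_prefix] at h1 h2 ⊢
  exact List.prefix_of_prefix_length_le h1 h2 (by simpa using hle)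

theorem pvDropThrough_decomp {c : Char} {w : List Char} (h : c ∈ w) :
    ∃ u, w = u ++ c :: pvDropThrough c w := by
  induction w with
  | nil => cases h
  | cons x xs ih =>
    by_cases hx : x = c
    · subst hx
      exact ⟨[], by simp [pvDropThrough]⟩
    · have hc : c ∈ xs := by
        rcases List.mem_cons.1 h with h' | h'
        · exact absurd h'.symm hx
        · exact h'
      rcases ih hc with ⟨u, hu⟩
      exact ⟨x :: u, by simp [pvDropThrough, hx]; exact hu⟩

theorem pvLds_step {p w : List Char} (c : Char) (h : pvLds p w) :
    pvLds (p ++ [c]) ((if w.contains c then pvDropThrough c w else w) ++ [c]) := by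
  obtain ⟨hsuf, hnd, hmax⟩ := h
  by_cases hc : c ∈ w
  · simp only [List.contains_iff_mem.2 hc, if_pos]
    rcases pvDropThrough_decomp hc with ⟨u, hu⟩
    set d := pvDropThrough c w with hd
    -- facts about d
    have hcd_suf_w : c :: d <:+ w := ⟨u, hu.symm⟩
    have hd_suf_w : d <:+ w := ⟨u ++ [c], by simpa using hu.symm⟩
    have hd_suf_p : d <:+ p := hd_suf_w.trans hsuf
    have hnd' : (c :: d).Nodup := hcd_suf_w.sublist.nodup hnd
    have hcnotd : c ∉ d := (List.nodup_cons.1 hnd').1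
    have hdnd : d.Nodup := (List.nodup_cons.1 hnd').2
    refine ⟨?_, ?_, ?_⟩
    · rcases hd_suf_p with ⟨t, ht⟩
      exact ⟨t, by rw [← List.append_assoc, ht]⟩
    · simp [List.nodup_append, hdnd]
      exact fun a ha h => hcnotd (h ▸ ha)
    · intro s hs hsnd
      rcases pvSuffix_concat_case hs with rfl | ⟨s', rfl, hs'p⟩
      · simp
      · obtain ⟨hs'nd, hdisj⟩ : s'.Nodup ∧ ∀ a ∈ s', ¬ a = c := by
          simpa [List.nodup_append] using hsnd
        have hcnots' : c ∉ s' := fun hm => hdisj c hm rfl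
        have hlen : s'.length ≤ d.length := by
          by_contra hlt
          rw [Nat.not_le] at hlt
          have hs'w : s' <:+ w := pvSuffix_of_suffix_le hs'p hsuf (hmax s' hs'p hs'nd)
          have hcds' : c :: d <:+ s' :=
            pvSuffix_of_suffix_le hcd_suf_w hs'w (by simpa using hlt)
          exact hcnots' (hcds'.sublist.mem (List.mem_cons_self))
        simpa using Nat.add_le_add_right hlen 1
  · simp only [List.contains_iff_mem, hc, if_neg, not_false_iff]
    refine ⟨?_, ?_, ?_⟩
    · rcases hsuf with ⟨t, ht⟩
      exact ⟨t, by rw [← List.append_assoc, ht]⟩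
    · simp [List.nodup_append, hnd]
      exact fun a ha h => hc (h ▸ ha)
    · intro s hs hsnd
      rcases pvSuffix_concat_case hs with rfl | ⟨s', rfl, hs'p⟩
      · simp
      · have hs'nd : s'.Nodup := (List.nodup_append.1 hsnd).1
        simpa using Nat.add_le_add_right (hmax s' hs'p hs'nd) 1

-- A's length test `len(pm) == len(set(pm))` is exactly Nodup.
theorem pvSetLen_iff_nodup (l : List Char) :
    ((l.length : Int) = PySem.Set.len (PySem.Set.ofList l)) ↔ l.Nodup := by
  have h1 : List.Nodup (PySem.Set.ofList l) := PySem.Set.nodup_ofList l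
  have h3 : List.Perm (PySem.Set.ofList l) l.dedup := by
    refine (List.perm_ext_iff_of_nodup h1 (List.nodup_dedup l)).2 ?_
    intro a
    simp [PySem.Set.mem_ofList, List.mem_dedup]
  have hlen : List.length (PySem.Set.ofList l) = l.dedup.length := h3.length_eq
  simp only [PySem.Set.len, hlen]
  constructor
  · intro h
    have hNat : l.dedup.length = l.length := by exact_mod_cast h.symm
    have heq : l.dedup = l := (List.dedup_sublist l).eq_of_length hNat
    exact List.dedup_eq_self.1 heq
  · intro h
    rw [List.dedup_eq_self.2 h]

-- The sliced window A inspects equals the last n characters of the scanned prefix.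
theorem pvSlice_eq_suffix (p rest : List Char) {n : Int} (h1 : 1 ≤ n)
    (h2 : n ≤ (p.length : Int)) :
    PySem.List.slice (p ++ rest) (some ((p.length : Int) - n)) (some (p.length : Int)) =
      p.drop (p.length - n.toNat) := by
  have ha : (0 : Int) ≤ (p.length : Int) - n := by omega
  have hb : (0 : Int) ≤ (p.length : Int) := by omega
  rw [PySem.List.slice_toNat _ ha hb]
  have hatoNat : ((p.length : Int) - n).toNat = p.length - n.toNat := by omega
  have hbtoNat : ((p.length : Int)).toNat = p.length := by omega
  rw [hatoNat, hbtoNat]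
  have hle : p.length - n.toNat ≤ p.length := Nat.sub_le _ _
  rw [List.drop_append_of_le_length hle]
  refine List.take_left' ?_
  have hn' : n.toNat ≤ p.length := by omega
  simp

-- the key pointwise fact: B's window test fires exactly when A's check fires
theorem pvCond_iff {p w : List Char} (rest : List Char) {n : Int} (h : pvLds p w)
    (hn : n ≤ (p.length : Int)) :
    ((w.length : Int) ≥ n) ↔
      ((PySem.List.slice (p ++ rest) (some ((p.length : Int) - n)) (some (p.length : Int))).length : Int)
        = PySem.Set.len (PySem.Set.ofList
            (PySem.List.slice (p ++ rest) (some ((p.length : Int) - n)) (some (p.length : Int)))) := by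
  obtain ⟨hsuf, hnd, hmax⟩ := h
  by_cases h1 : 1 ≤ n
  · rw [pvSlice_eq_suffix p rest h1 hn, pvSetLen_iff_nodup]
    set pm := p.drop (p.length - n.toNat) with hpm
    have hpm_suf : pm <:+ p := List.drop_suffix _ _
    have hpm_len : pm.length = n.toNat := by
      rw [hpm, List.length_drop]
      omega
    constructor
    · intro hwn
      have : pm <:+ w := by
        refine pvSuffix_of_suffix_le hpm_suf hsuf ?_
        rw [hpm_len]; omega
      exact this.sublist.nodup hnd
    · intro hpmnd
      have := hmax pm hpm_suf hpmnd
      rw [hpm_len] at this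
      omega
  · -- n ≤ 0: the slice is empty, both sides hold
    rw [not_le] at h1
    have hle : (0:Int) ≤ (p.length : Int) - n := by omega
    have hempty : PySem.List.slice (p ++ rest) (some ((p.length : Int) - n)) (some (p.length : Int)) = [] := by
      rw [PySem.List.slice_toNat _ hle (by omega)]
      have h0 : ((p.length : Int)).toNat - ((p.length : Int) - n).toNat = 0 := by omega
      rw [h0, List.take_zero]
    rw [hempty]
    constructor
    · intro _
      simp [PySem.Set.ofList, PySem.Set.empty, PySem.Set.len]
    · intro _
      omega

theorem pvLoop_eq : ∀ (fuel p w : List Char) (n : Int), pvLds p w →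
    pvAGo (p ++ fuel) fuel ((p.length : Int) + 1) n = pvBGo fuel w (p.length : Int) n := by
  intro fuel
  induction fuel with
  | nil => intro p w n _; rfl
  | cons c rest ih =>
    intro p w n h
    have hstep : pvLds (p ++ [c]) ((if w.contains c then pvDropThrough c w else w) ++ [c]) :=
      pvLds_step c h
    set w' := (if w.contains c then pvDropThrough c w else w) ++ [c] with hw'
    have hw'le : w'.length ≤ p.length + 1 := by
      have := hstep.1.length_le
      simpa using this
    have hrw : p ++ c :: rest = (p ++ [c]) ++ rest := by simp
    have ihn := ih (p ++ [c]) w' n hstep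
    simp only [List.length_append, List.length_cons, List.length_nil, Nat.zero_add,
      Nat.cast_add, Nat.cast_one] at ihn
    rw [pvAGo, pvBGo]
    simp only [← hw', hrw]
    by_cases hn : (p.length : Int) + 1 ≥ n
    · have hiff := pvCond_iff (p := p ++ [c]) (w := w') rest (n := n) hstep
        (by simp; omega)
      simp only [List.length_append, List.length_cons, List.length_nil, Nat.zero_add,
        Nat.cast_add, Nat.cast_one] at hiff
      rw [if_pos hn]
      by_cases hB : ((w'.length : Int) ≥ n)
      · rw [if_pos (hiff.1 hB), if_pos hB]
      · rw [if_neg (fun hcon => hB (hiff.2 hcon)), if_neg hB]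
        exact ihn
    · have hBlt : ¬ ((w'.length : Int) ≥ n) := by
        have : (w'.length : Int) ≤ (p.length : Int) + 1 := by exact_mod_cast hw'le
        omega
      rw [if_neg hn, if_neg hBlt]
      exact ihn

theorem pvLds_nil : pvLds [] [] := by
  refine ⟨List.suffix_rfl, List.nodup_nil, ?_⟩
  intro s hs _
  rw [List.suffix_nil.1 hs]

-- ===== VERDICT (by name: the statement is the Claim_ definition above) =====
theorem get_first_idx_after_n_distinct_chars_spec : Claim_equal_get_first_idx_after_n_distinct_chars := by
  intro buffer n _
  show get_first_idx_after_n_distinct_chars buffer n = get_first_idx_after_n_distinct_chars_alt buffer n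
  unfold get_first_idx_after_n_distinct_chars get_first_idx_after_n_distinct_chars_alt
  have := pvLoop_eq buffer.toList [] [] n pvLds_nil
  simpa using this
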